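-- pv_equiv track=rewrite | github.com/pcostam/PRI_pt2 | try3.py | CombMNZScore
-- ===== SOURCE A (Python) =====
-- def CombMNZScore(rankers):
--     dictCombMNZ = dict()
--     #number of ranks where term occurs
--     dictCountRank = dict()
--     for ranker in rankers:
--         for key, rank in ranker.items():
--             if key not in dictCountRank.keys():
--                 dictCountRank[key] = 1
--             else:
--                 dictCountRank[key] += 1
--
--     for ranker in rankers:
--         for key, rank in ranker.items():
--               if key not in dictCombMNZ.keys():
--                   dictCombMNZ[key] = dictCountRank[key]*rank
--               else:
--                   dictCombMNZ[key] += dictCountRank[key]*rank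
--     return dictCombMNZ
-- ===== SOURCE B (Python) =====
-- def CombMNZScore(rankers):
--     counts = {}
--     sums = {}
--     for ranker in rankers:
--         for key, rank in ranker.items():
--             counts[key] = counts.get(key, 0) + 1
--             sums[key] = sums.get(key, 0) + rank
--     return {key: counts[key] * s for key, s in sums.items()}
-- ===== Notes on version B (the rewrite author's own statement) =====
-- stated objective: simpler
-- what changed: Replaces A's two full passes over all rankers (one to count occurrences, one to accumulate count*rank) by a single pass building a count dict and a rank-sum dict together, then one small multiply pass over the aggregated keys (count is constant per key, so count*sum(ranks) equals the summed count*rank).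
import Mathlib
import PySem

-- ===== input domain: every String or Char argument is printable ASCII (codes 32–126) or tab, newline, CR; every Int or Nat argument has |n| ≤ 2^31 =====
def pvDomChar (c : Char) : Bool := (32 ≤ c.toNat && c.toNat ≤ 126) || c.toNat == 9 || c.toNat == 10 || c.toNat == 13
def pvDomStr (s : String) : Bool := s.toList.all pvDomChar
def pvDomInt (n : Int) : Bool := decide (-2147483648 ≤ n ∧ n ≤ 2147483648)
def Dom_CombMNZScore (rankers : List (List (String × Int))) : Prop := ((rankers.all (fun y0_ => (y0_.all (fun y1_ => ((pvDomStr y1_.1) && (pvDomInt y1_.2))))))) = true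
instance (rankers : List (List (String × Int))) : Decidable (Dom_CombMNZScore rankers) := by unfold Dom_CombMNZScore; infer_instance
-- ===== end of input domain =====

-- B replaces A's two full passes by one aggregation pass building a count dict and a
-- rank-sum dict together, then one multiply pass (count is constant per key, so
-- count*sum(ranks) = sum of count*rank); objective: simpler.

-- ===== PORT A =====
-- each inner association list stands for a Python dict; 'for key, rank in ranker.items()'
-- iterates the dict's items, i.e. (PySem.Dict.ofList ranker).items
def CombMNZScore (rankers : List (List (String × Int))) : List (String × Int) :=
  let dictCountRank : PySem.Dict String Int := rankers.foldl (fun d ranker =>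
    (PySem.Dict.ofList ranker).items.foldl (fun d p =>
      if d.contains p.1 = false then d.insert p.1 1
      else d.insert p.1 (d.getD p.1 0 + 1)) d) PySem.Dict.empty
  let dictCombMNZ : PySem.Dict String Int := rankers.foldl (fun d ranker =>
    (PySem.Dict.ofList ranker).items.foldl (fun d p =>
      -- dictCountRank[key] is always present here; getD _ 0 returns the stored value
      if d.contains p.1 = false then d.insert p.1 (dictCountRank.getD p.1 0 * p.2)
      else d.insert p.1 (d.getD p.1 0 + dictCountRank.getD p.1 0 * p.2)) d) PySem.Dict.empty
  dictCombMNZ.items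

-- ===== PORT B =====
def CombMNZScore_alt (rankers : List (List (String × Int))) : List (String × Int) :=
  let st : PySem.Dict String Int × PySem.Dict String Int := rankers.foldl (fun st ranker =>
    (PySem.Dict.ofList ranker).items.foldl (fun st p =>
      (st.1.insert p.1 (st.1.getD p.1 0 + 1), st.2.insert p.1 (st.2.getD p.1 0 + p.2))) st)
    (PySem.Dict.empty, PySem.Dict.empty)
  -- the final dict comprehension: sums' keys are distinct, so its items are this map
  st.2.items.map (fun p => (p.1, st.1.getD p.1 0 * p.2))

-- ===== PRECONDITION & SPEC =====
def Spec_CombMNZScore (rankers : List (List (String × Int))) (out : List (String × Int)) : Prop := out = CombMNZScore_alt rankers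
instance (rankers : List (List (String × Int))) (out : List (String × Int)) : Decidable (Spec_CombMNZScore rankers out) := by unfold Spec_CombMNZScore; infer_instance

-- ===== CLAIM (what is proved, stated in full; the proofs are below) =====
def Claim_equal_CombMNZScore : Prop := ∀ (rankers : List (List (String × Int))), Dom_CombMNZScore rankers → Spec_CombMNZScore rankers (CombMNZScore rankers)

-- ===== LEMMAS AND PROOFS =====

-- flatten a loop nested over rankers into one loop over the concatenated items
theorem foldl_flatMap_loop {α β σ : Type} (g : β → List α) (f : σ → α → σ) :
    ∀ (rs : List β) (i : σ),
    (rs.flatMap g).foldl f i = rs.foldl (fun d r => (g r).foldl f d) i := by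
  intro rs
  induction rs with
  | nil => intro i; rfl
  | cons r rs ih => intro i; simp [List.flatMap_cons, List.foldl_append, ih]

-- get? of a value-mapped items list
theorem get?_mk_map_val (c : String → Int) (l : List (String × Int)) (k : String) :
    (PySem.Dict.mk (l.map (fun p => (p.1, c p.1 * p.2)))).get? k
      = ((PySem.Dict.mk l).get? k).map (fun v => c k * v) := by
  induction l with
  | nil => rfl
  | cons p rest ih =>
      obtain ⟨k1, v1⟩ := p
      simp only [List.map_cons, PySem.Dict.get?_mk_cons]
      by_cases h : k1 == k
      · have e : k1 = k := eq_of_beq h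
        subst e; simp
      · simp [h, ih]

theorem getD_map_val (c : String → Int) (d1 d2 : PySem.Dict String Int)
    (h : d2.items = d1.items.map (fun p => (p.1, c p.1 * p.2))) (k : String) :
    d2.getD k 0 = c k * d1.getD k 0 := by
  have h2 : d2 = PySem.Dict.mk (d1.items.map (fun p => (p.1, c p.1 * p.2))) := by
    cases d2; cases h; rfl
  subst h2
  rw [PySem.Dict.getD_eq_get?_getD, PySem.Dict.getD_eq_get?_getD, get?_mk_map_val]
  cases (PySem.Dict.mk d1.items).get? k <;> simp

theorem contains_map_val (c : String → Int) (d1 d2 : PySem.Dict String Int)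
    (h : d2.items = d1.items.map (fun p => (p.1, c p.1 * p.2))) (k : String) :
    d2.contains k = d1.contains k := by
  have h2 : d2 = PySem.Dict.mk (d1.items.map (fun p => (p.1, c p.1 * p.2))) := by
    cases d2; cases h; rfl
  subst h2
  rw [PySem.Dict.contains_eq_isSome_get?, PySem.Dict.contains_eq_isSome_get?, get?_mk_map_val]
  cases (PySem.Dict.mk d1.items).get? k <;> simp

-- invariant: A's score dict is B's sum dict with each value scaled by c of its key
theorem sum_loop_map_val (c : String → Int) :
    ∀ (L : List (String × Int)) (d1 d2 : PySem.Dict String Int),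
    d2.items = d1.items.map (fun p => (p.1, c p.1 * p.2)) →
    (L.foldl (fun d p => d.insert p.1 (d.getD p.1 0 + c p.1 * p.2)) d2).items
      = (L.foldl (fun d p => d.insert p.1 (d.getD p.1 0 + p.2)) d1).items.map
          (fun p => (p.1, c p.1 * p.2)) := by
  intro L
  induction L with
  | nil => intro d1 d2 h; simpa using h
  | cons p rest ih =>
      intro d1 d2 h
      simp only [List.foldl_cons]
      apply ih
      rw [PySem.Dict.items_insert, PySem.Dict.items_insert,
          contains_map_val c d1 d2 h, getD_map_val c d1 d2 h, h]
      by_cases hc : d1.contains p.1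
      · simp only [hc, if_true, List.map_map]
        apply List.map_congr_left
        intro q _
        by_cases hq : q.1 == p.1 <;> simp [hq, Function.comp]
        ring
      · simp only [hc, if_false, List.map_append, List.map_cons, List.map_nil,
          Bool.false_eq_true]
        ring_nf

-- A's branching count step is the unconditional insert of getD+1
theorem count_step_eq :
    (fun (d : PySem.Dict String Int) (p : String × Int) =>
      if d.contains p.1 = false then d.insert p.1 1
      else d.insert p.1 (d.getD p.1 0 + 1))
    = (fun d p => d.insert p.1 (d.getD p.1 0 + 1)) := by
  funext d p
  by_cases h : d.contains p.1
  · simp [h]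
  · simp [h, PySem.Dict.getD_of_not_contains d 0 (by simpa using h)]

-- A's branching score step is the unconditional insert of getD + c*rank
theorem sum_step_eq (c : PySem.Dict String Int) :
    (fun (d : PySem.Dict String Int) (p : String × Int) =>
      if d.contains p.1 = false then d.insert p.1 (c.getD p.1 0 * p.2)
      else d.insert p.1 (d.getD p.1 0 + c.getD p.1 0 * p.2))
    = (fun d p => d.insert p.1 (d.getD p.1 0 + c.getD p.1 0 * p.2)) := by
  funext d p
  by_cases h : d.contains p.1
  · simp [h]
  · simp [h, PySem.Dict.getD_of_not_contains d 0 (by simpa using h)]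

theorem CombMNZScore_eq_alt (rankers : List (List (String × Int))) :
    CombMNZScore rankers = CombMNZScore_alt rankers := by
  simp only [CombMNZScore, CombMNZScore_alt]
  rw [← foldl_flatMap_loop, ← foldl_flatMap_loop, ← foldl_flatMap_loop,
      PySem.List.foldl_prod_mk
        (fun (d : PySem.Dict String Int) (p : String × Int) => d.insert p.1 (d.getD p.1 0 + 1))
        (fun (d : PySem.Dict String Int) (p : String × Int) => d.insert p.1 (d.getD p.1 0 + p.2)),
      count_step_eq]
  set L := rankers.flatMap (fun r => (PySem.Dict.ofList r).items) with hL
  set cnt : PySem.Dict String Int := L.foldl (fun d p => d.insert p.1 (d.getD p.1 0 + 1)) PySem.Dict.empty with hcnt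
  rw [sum_step_eq cnt]
  exact sum_loop_map_val (fun k => cnt.getD k 0) L PySem.Dict.empty PySem.Dict.empty rfl

-- ===== VERDICT (by name: the statement is the Claim_ definition above) =====
theorem CombMNZScore_spec : Claim_equal_CombMNZScore := by
  intro rankers _
  unfold Spec_CombMNZScore
  exact CombMNZScore_eq_alt rankers
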